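-- pv_equiv track=rewrite | github.com/octavianbuciumas/nsi-codes | 01.py | depouille
-- ===== SOURCE A (Python) =====
-- def depouille(urne):
--     resultat = {'A' : 0,
--                     'B' : 0,
--                     'C' : 0}
--     for bulletin in urne:
--         if bulletin == 'A' or bulletin == 'B' or bulletin == 'C':
--             resultat[bulletin] = resultat[bulletin] + 1
--         else:
--             pass
--     return resultat
-- ===== SOURCE B (Python) =====
-- def depouille(urne):
--     return {c: urne.count(c) for c in ('A', 'B', 'C')}
-- ===== Notes on version B (the rewrite author's own statement) =====
-- stated objective: idiomatic
-- what changed: Replaced the mutating single-pass loop with a dict comprehension that computes each candidate's total with list.count, one full scan per candidate.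
import Mathlib
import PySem

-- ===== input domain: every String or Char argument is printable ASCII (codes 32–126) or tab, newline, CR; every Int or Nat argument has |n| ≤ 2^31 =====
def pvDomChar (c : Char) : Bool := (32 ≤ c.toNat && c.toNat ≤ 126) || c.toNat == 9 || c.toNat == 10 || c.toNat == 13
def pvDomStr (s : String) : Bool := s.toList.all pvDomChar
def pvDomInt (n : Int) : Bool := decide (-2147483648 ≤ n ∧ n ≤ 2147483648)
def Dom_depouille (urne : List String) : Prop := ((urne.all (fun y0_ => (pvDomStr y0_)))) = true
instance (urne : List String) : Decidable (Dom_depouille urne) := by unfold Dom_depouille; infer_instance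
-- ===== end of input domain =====

-- B replaces the mutating single-pass loop with a dict comprehension counting each candidate via list.count (idiomatic).


-- ===== PORT A =====
def depouille (urne : List String) : List (String × Int) :=
  let resultat : PySem.Dict String Int := PySem.Dict.ofList [("A", 0), ("B", 0), ("C", 0)]
  let resultat := urne.foldl
    (fun resultat bulletin =>
      if bulletin = "A" ∨ bulletin = "B" ∨ bulletin = "C" then
        resultat.insert bulletin (resultat.getD bulletin 0 + 1)
      else resultat) resultat
  resultat.items

-- ===== PORT B =====
def depouille_alt (urne : List String) : List (String × Int) :=
  ["A", "B", "C"].map (fun c => (c, (urne.count c : Int)))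

-- ===== PRECONDITION & SPEC =====
def Spec_depouille (urne : List String) (out : List (String × Int)) : Prop := out = depouille_alt urne
instance (urne : List String) (out : List (String × Int)) : Decidable (Spec_depouille urne out) := by unfold Spec_depouille; infer_instance

-- ===== CLAIM (what is proved, stated in full; the proofs are below) =====
def Claim_equal_depouille : Prop := ∀ (urne : List String), Dom_depouille urne → Spec_depouille urne (depouille urne)

-- ===== LEMMAS AND PROOFS =====
theorem depouille_loop (urne : List String) (a b c : Int) :
    (urne.foldl
      (fun resultat bulletin =>
        if bulletin = "A" ∨ bulletin = "B" ∨ bulletin = "C" then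
          resultat.insert bulletin (resultat.getD bulletin 0 + 1)
        else resultat)
      (PySem.Dict.mk [("A", a), ("B", b), ("C", c)])).items
    = [("A", a + urne.count "A"), ("B", b + urne.count "B"), ("C", c + urne.count "C")] := by
  induction urne generalizing a b c with
  | nil => simp
  | cons x xs ih =>
    by_cases hA : x = "A"
    · subst hA
      simp only [List.foldl_cons]
      rw [show (PySem.Dict.mk [("A", a), ("B", b), ("C", c)]).insert "A"
            ((PySem.Dict.mk [("A", a), ("B", b), ("C", c)]).getD "A" 0 + 1)
          = PySem.Dict.mk [("A", a + 1), ("B", b), ("C", c)] by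
            apply PySem.Dict.ext
            simp [PySem.Dict.insert, PySem.Dict.getD, PySem.Dict.get?,
              PySem.Dict.contains]]
      rw [if_pos (by tauto), ih]
      simp
      omega
    · by_cases hB : x = "B"
      · subst hB
        simp only [List.foldl_cons]
        rw [show (PySem.Dict.mk [("A", a), ("B", b), ("C", c)]).insert "B"
              ((PySem.Dict.mk [("A", a), ("B", b), ("C", c)]).getD "B" 0 + 1)
            = PySem.Dict.mk [("A", a), ("B", b + 1), ("C", c)] by
              apply PySem.Dict.ext
              simp [PySem.Dict.insert, PySem.Dict.getD, PySem.Dict.get?,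
                PySem.Dict.contains]]
        rw [if_pos (by tauto), ih]
        simp [hA]
        omega
      · by_cases hC : x = "C"
        · subst hC
          simp only [List.foldl_cons]
          rw [show (PySem.Dict.mk [("A", a), ("B", b), ("C", c)]).insert "C"
                ((PySem.Dict.mk [("A", a), ("B", b), ("C", c)]).getD "C" 0 + 1)
              = PySem.Dict.mk [("A", a), ("B", b), ("C", c + 1)] by
                apply PySem.Dict.ext
                simp [PySem.Dict.insert, PySem.Dict.getD, PySem.Dict.get?,
                  PySem.Dict.contains]]
          rw [if_pos (by tauto), ih]
          simp [hA, hB]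
          omega
        · simp only [List.foldl_cons]
          rw [if_neg (by tauto), ih]
          simp [hA, hB, hC]

-- ===== VERDICT (by name: the statement is the Claim_ definition above) =====
theorem depouille_spec : Claim_equal_depouille := by
  intro urne _
  unfold Spec_depouille depouille depouille_alt
  simp only []
  rw [show PySem.Dict.ofList [("A", (0:Int)), ("B", 0), ("C", 0)]
      = PySem.Dict.mk [("A", 0), ("B", 0), ("C", 0)] from by decide]
  rw [depouille_loop]
  simp
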